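-- pv_equiv track=rewrite | github.com/chooban/maclab | group_sequences.py | find_super_sequences
-- ===== SOURCE A (Python) =====
-- def find_super_sequences(seq, possibles):
--     """
--     Returns a list of tuples for matched supersequences. The tuples consist of
--     the index in possibles, and the value itself.
--     """
--     found = list()
--     i = 0
--     while (i < len(possibles)):
--         p = possibles[i]
--         # This is against PEP-8, but does save time and since the main time
--         # sink in this script is .startswith, then it's worth it
--         if (p[:len(seq)] == seq):
--             found.append((i, p))
--         else:
--             break
--         i = i + 1
--     return found
-- ===== SOURCE B (Python) =====
-- def find_super_sequences(seq, possibles):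
--     """
--     Returns a list of tuples for matched supersequences. The tuples consist of
--     the index in possibles, and the value itself.
--     """
--     def matched(ps):
--         # recursively collect the leading block of values starting with seq
--         if ps and ps[0].startswith(seq):
--             return [ps[0]] + matched(ps[1:])
--         return []
--     return list(enumerate(matched(possibles)))
-- ===== Notes on version B (the rewrite author's own statement) =====
-- stated objective: simpler
-- what changed: B recursively collects just the matching leading values (no index counter, no accumulator, no tuple construction inside the scan) and attaches the indices afterwards with enumerate, whereas A runs a while loop over an explicit index appending (i, p) tuples and testing the prefix by slice comparison.
import Mathlib
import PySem

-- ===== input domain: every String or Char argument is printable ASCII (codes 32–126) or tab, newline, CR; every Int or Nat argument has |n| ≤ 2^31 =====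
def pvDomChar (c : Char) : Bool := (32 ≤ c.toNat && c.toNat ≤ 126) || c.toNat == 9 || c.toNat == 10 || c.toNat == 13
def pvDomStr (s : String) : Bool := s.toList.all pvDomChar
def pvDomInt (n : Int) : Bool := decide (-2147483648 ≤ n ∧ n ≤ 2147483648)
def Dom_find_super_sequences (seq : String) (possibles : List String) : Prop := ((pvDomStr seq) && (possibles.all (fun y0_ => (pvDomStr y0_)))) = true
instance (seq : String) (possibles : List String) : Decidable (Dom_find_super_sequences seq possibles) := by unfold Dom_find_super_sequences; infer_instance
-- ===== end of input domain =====

-- B recursively collects the matching leading values and attaches indices afterwards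
-- with enumerate, instead of A's index-counting while loop appending (i, p) tuples (simpler).

-- ===== PORT A =====
-- A's while loop over index i, appending (i, p) to `found`, breaking at the first
-- slice-comparison mismatch p[:len(seq)] != seq.
def find_super_sequences_go (seq : List Char) (possibles : List String)
    (i : Int) (found : List (Int × String)) : List (Int × String) :=
  match possibles with
  | [] => found
  | p :: rest =>
      if PySem.List.slice p.toList none (some (seq.length : Int)) = seq then
        find_super_sequences_go seq rest (i + 1) (found ++ [(i, p)])
      else
        found

def find_super_sequences (seq : String) (possibles : List String) : List (Int × String) :=
  find_super_sequences_go seq.toList possibles 0 []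

-- ===== PORT B =====
-- B's helper matched(ps): the leading block of values starting with seq, built by recursion.
def fss_matched (seq : String) (ps : List String) : List String :=
  match ps with
  | [] => []
  | p :: rest =>
      if PySem.Str.startswith p seq then p :: fss_matched seq rest else []

-- B: list(enumerate(matched(possibles))).
def find_super_sequences_alt (seq : String) (possibles : List String) : List (Int × String) :=
  PySem.List.enumerate (fss_matched seq possibles) 0

-- ===== PRECONDITION & SPEC =====
def Spec_find_super_sequences (seq : String) (possibles : List String) (out : List (Int × String)) : Prop := out = find_super_sequences_alt seq possibles
instance (seq : String) (possibles : List String) (out : List (Int × String)) : Decidable (Spec_find_super_sequences seq possibles out) := by unfold Spec_find_super_sequences; infer_instance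

-- ===== CLAIM (what is proved, stated in full; the proofs are below) =====
def Claim_equal_find_super_sequences : Prop := ∀ (seq : String) (possibles : List String), Dom_find_super_sequences seq possibles → Spec_find_super_sequences seq possibles (find_super_sequences seq possibles)

-- ===== LEMMAS AND PROOFS =====

-- A's match test (slice-of-length-|seq| equality) is exactly startswith.
theorem fss_cond_iff (seq : List Char) (p : String) :
    (PySem.List.slice p.toList none (some (seq.length : Int)) = seq)
      ↔ PySem.Chars.startswith p.toList seq = true := by
  rw [PySem.List.slice_to_natCast, PySem.Chars.startswith_iff, List.prefix_iff_eq_take]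
  exact eq_comm

-- A's loop appends exactly the enumeration (from i) of B's matched block to `found`.
theorem fss_go_eq (seq : String) (possibles : List String) (i : Int) (found : List (Int × String)) :
    find_super_sequences_go seq.toList possibles i found
      = found ++ PySem.List.enumerate (fss_matched seq possibles) i := by
  induction possibles generalizing i found with
  | nil => simp [find_super_sequences_go, fss_matched]
  | cons p rest ih =>
      by_cases h : PySem.Chars.startswith p.toList seq.toList = true
      · rw [find_super_sequences_go]
        simp only [(fss_cond_iff seq.toList p).mpr h]
        rw [ih]
        simp [fss_matched, h, PySem.List.enumerate_cons]
      · rw [find_super_sequences_go]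
        rw [if_neg (fun hc => h ((fss_cond_iff seq.toList p).mp hc))]
        simp [fss_matched, h]

-- ===== VERDICT (by name: the statement is the Claim_ definition above) =====
theorem find_super_sequences_spec : Claim_equal_find_super_sequences := by
  intro seq possibles _
  unfold Spec_find_super_sequences find_super_sequences find_super_sequences_alt
  rw [fss_go_eq]
  simp
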